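-- pv_equiv track=rewrite | github.com/pin705/cultivation-world-simulator | tools/i18n/cleanup_po_comments.py | collapse_comments
-- ===== SOURCE A (Python) =====
-- def collapse_comments(lines: list[str]) -> tuple[list[str], int, int]:
--     output: list[str] = []
--     collapsed_separator_blocks = 0
--     removed_empty_extracted_comments = 0
--     index = 0
--
--     while index < len(lines):
--         line = lines[index]
--         if (
--             index + 2 < len(lines)
--             and lines[index].startswith("#")
--             and set(lines[index].replace("#", "").strip()) == {"="}
--             and lines[index + 1].startswith("# ")
--             and lines[index + 2].startswith("#")
--             and set(lines[index + 2].replace("#", "").strip()) == {"="}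
--         ):
--             output.append(lines[index + 1])
--             collapsed_separator_blocks += 1
--             index += 3
--             continue
--
--         if line.startswith("#.") and ":" in line and line.split(":", 1)[1].strip() == "":
--             removed_empty_extracted_comments += 1
--             index += 1
--             continue
--
--         output.append(line)
--         index += 1
--
--     return output, collapsed_separator_blocks, removed_empty_extracted_comments
-- ===== SOURCE B (Python) =====
-- def _is_sep(line: str) -> bool:
--     return line.startswith("#") and set(line.replace("#", "").strip()) == {"="}
--
--
-- def collapse_comments(lines: list[str]) -> tuple[list[str], int, int]:
--     # Pass 1: collapse separator blocks (===== / # title / =====) to their middle line.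
--     middle: list[str] = []
--     collapsed = 0
--     i = 0
--     n = len(lines)
--     while i < n:
--         if i + 2 < n and _is_sep(lines[i]) and lines[i + 1].startswith("# ") and _is_sep(lines[i + 2]):
--             middle.append(lines[i + 1])
--             collapsed += 1
--             i += 3
--         else:
--             middle.append(lines[i])
--             i += 1
--     # Pass 2: drop empty extracted comments ("#. …: <blank>").
--     removed = 0
--     output: list[str] = []
--     for line in middle:
--         if line.startswith("#.") and ":" in line and line.split(":", 1)[1].strip() == "":
--             removed += 1
--         else:
--             output.append(line)
--     return output, collapsed, removed
-- ===== Notes on version B (the rewrite author's own statement) =====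
-- stated objective: simpler
-- what changed: Replaces A's fused variable-step loop (separator collapsing and empty-comment filtering interleaved in one while) by two sequential passes: pass 1 only collapses separator blocks, pass 2 filters empty '#.' comments from the intermediate list.
import Mathlib
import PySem

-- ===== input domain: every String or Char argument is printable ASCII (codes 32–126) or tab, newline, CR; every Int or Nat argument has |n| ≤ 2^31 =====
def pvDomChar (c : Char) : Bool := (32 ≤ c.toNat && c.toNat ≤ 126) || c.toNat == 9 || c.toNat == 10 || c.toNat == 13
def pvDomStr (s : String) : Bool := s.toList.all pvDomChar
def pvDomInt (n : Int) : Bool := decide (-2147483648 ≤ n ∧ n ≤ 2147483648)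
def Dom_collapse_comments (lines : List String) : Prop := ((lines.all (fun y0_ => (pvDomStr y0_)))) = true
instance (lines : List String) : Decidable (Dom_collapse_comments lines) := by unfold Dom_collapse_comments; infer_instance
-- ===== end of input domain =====

-- B replaces A's fused variable-step loop by two sequential passes (collapse separator
-- blocks first, then filter empty '#.' comments); objective: simpler decomposition.

-- ===== PORT A =====
-- line.startswith("#") and set(line.replace("#", "").strip()) == {"="}
def pvIsSepA (s : String) : Bool :=
  PySem.Str.startswith s "#" &&
    PySem.Set.equal (PySem.Set.ofList (PySem.Str.strip (PySem.Str.replace s "#" "")).toList) ['=']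

-- line.startswith("#.") and ":" in line and line.split(":", 1)[1].strip() == ""
def pvIsEmptyExtractedA (line : String) : Bool :=
  PySem.Str.startswith line "#." && PySem.Str.isIn ":" line &&
    PySem.Str.strip (PySem.List.pyGetD ((PySem.Str.splitMax? line ":" 1).getD []) 1 "") == ""

def collapse_comments : List String → List String × Int × Int
  | [] => ([], 0, 0)
  | a :: b :: c :: rest =>
    if pvIsSepA a && PySem.Str.startswith b "# " && pvIsSepA c then
      let r := collapse_comments rest
      (b :: r.1, r.2.1 + 1, r.2.2)
    else if pvIsEmptyExtractedA a then
      let r := collapse_comments (b :: c :: rest)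
      (r.1, r.2.1, r.2.2 + 1)
    else
      let r := collapse_comments (b :: c :: rest)
      (a :: r.1, r.2.1, r.2.2)
  | a :: rest =>
    if pvIsEmptyExtractedA a then
      let r := collapse_comments rest
      (r.1, r.2.1, r.2.2 + 1)
    else
      let r := collapse_comments rest
      (a :: r.1, r.2.1, r.2.2)

-- ===== PORT B =====
-- B-side copies of the two line predicates (Source B re-states them itself).
def pvIsSepB (s : String) : Bool :=
  PySem.Str.startswith s "#" &&
    PySem.Set.equal (PySem.Set.ofList (PySem.Str.strip (PySem.Str.replace s "#" "")).toList) ['=']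

def pvIsEmptyExtractedB (line : String) : Bool :=
  PySem.Str.startswith line "#." && PySem.Str.isIn ":" line &&
    PySem.Str.strip (PySem.List.pyGetD ((PySem.Str.splitMax? line ":" 1).getD []) 1 "") == ""

-- Pass 1: collapse separator blocks only.
def pvPass1 : List String → List String × Int
  | [] => ([], 0)
  | a :: rest =>
    match h : rest with
    | b :: c :: rest' =>
      if pvIsSepB a && PySem.Str.startswith b "# " && pvIsSepB c then
        let r := pvPass1 rest'
        (b :: r.1, r.2 + 1)
      else
        let r := pvPass1 (b :: c :: rest')
        (a :: r.1, r.2)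
    | [_b] =>
      let r := pvPass1 rest
      (a :: r.1, r.2)
    | [] =>
      let r := pvPass1 rest
      (a :: r.1, r.2)
termination_by l => l.length
decreasing_by all_goals (simp_all; try omega)

-- Pass 2: drop empty extracted comments.
def pvPass2 : List String → List String × Int
  | [] => ([], 0)
  | a :: rest =>
    let r := pvPass2 rest
    if pvIsEmptyExtractedB a then (r.1, r.2 + 1) else (a :: r.1, r.2)

def collapse_comments_alt (lines : List String) : List String × Int × Int :=
  let m := pvPass1 lines
  let o := pvPass2 m.1
  (o.1, m.2, o.2)

-- ===== PRECONDITION & SPEC =====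
def Spec_collapse_comments (lines : List String) (out : List String × Int × Int) : Prop := out = collapse_comments_alt lines
instance (lines : List String) (out : List String × Int × Int) : Decidable (Spec_collapse_comments lines out) := by unfold Spec_collapse_comments; infer_instance

-- ===== CLAIM (what is proved, stated in full; the proofs are below) =====
def Claim_equal_collapse_comments : Prop := ∀ (lines : List String), Dom_collapse_comments lines → Spec_collapse_comments lines (collapse_comments lines)

-- ===== LEMMAS AND PROOFS =====

lemma isSepB_eq (s : String) : pvIsSepB s = pvIsSepA s := rfl

lemma isEmptyB_eq (s : String) : pvIsEmptyExtractedB s = pvIsEmptyExtractedA s := rfl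

-- A line starting with "# " does not start with "#.", hence is never an empty extracted comment.
lemma not_empty_of_mid (b : String) (hb : PySem.Str.startswith b "# " = true) :
    pvIsEmptyExtractedA b = false := by
  have hpre : "# ".toList <+: b.toList := by
    rw [← PySem.Chars.startswith_iff]
    simpa [PySem.Str.startswith_eq] using hb
  obtain ⟨t, ht⟩ := hpre
  have hne : PySem.Chars.startswith b.toList "#.".toList = false := by
    rw [Bool.eq_false_iff]
    intro h
    rw [PySem.Chars.startswith_iff] at h
    obtain ⟨u, hu⟩ := h
    rw [← ht, show "# ".toList = ['#', ' '] from by decide,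
        show "#.".toList = ['#', '.'] from by decide] at hu
    simp at hu
  unfold pvIsEmptyExtractedA
  rw [PySem.Str.startswith_eq, hne]
  simp

lemma pass2_cons (a : String) (m : List String) :
    pvPass2 (a :: m) = if pvIsEmptyExtractedA a then ((pvPass2 m).1, (pvPass2 m).2 + 1)
      else (a :: (pvPass2 m).1, (pvPass2 m).2) := by
  simp [pvPass2, isEmptyB_eq]

lemma pass1_cons3 (a b c : String) (rest : List String) :
    pvPass1 (a :: b :: c :: rest) =
      if pvIsSepB a && PySem.Str.startswith b "# " && pvIsSepB c then
        (b :: (pvPass1 rest).1, (pvPass1 rest).2 + 1)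
      else (a :: (pvPass1 (b :: c :: rest)).1, (pvPass1 (b :: c :: rest)).2) := by
  simp only [pvPass1]

lemma fused_eq_two_pass (l : List String) :
    collapse_comments l =
      ((pvPass2 (pvPass1 l).1).1, (pvPass1 l).2, (pvPass2 (pvPass1 l).1).2) := by
  induction l using collapse_comments.induct with
  | case1 => simp [collapse_comments, pvPass1, pvPass2]
  | case2 a b c rest hcond ih =>
    have hb : PySem.Str.startswith b "# " = true := by
      simp only [Bool.and_eq_true] at hcond; exact hcond.1.2
    rw [collapse_comments, pass1_cons3]
    simp only [isSepB_eq, if_pos hcond]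
    simp [pass2_cons, not_empty_of_mid b hb, ih]
  | case3 a b c rest hcond hemp ih =>
    rw [collapse_comments, pass1_cons3]
    simp only [isSepB_eq, if_neg hcond]
    simp [pass2_cons, hemp, ih]
  | case4 a b c rest hcond hemp ih =>
    rw [collapse_comments, pass1_cons3]
    simp only [isSepB_eq, if_neg hcond]
    simp [pass2_cons, hemp, ih]
  | case5 a rest hshort hemp ih =>
    rcases rest with _ | ⟨x, _ | ⟨y, r⟩⟩
    · simp [collapse_comments, pvPass1, pvPass2, isEmptyB_eq, hemp]
    · by_cases hx : pvIsEmptyExtractedA x = true <;>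
        simp [collapse_comments, pvPass1, pvPass2, isEmptyB_eq, hemp, hx]
    · exact absurd rfl (hshort x y r)
  | case6 a rest hshort hemp ih =>
    rcases rest with _ | ⟨x, _ | ⟨y, r⟩⟩
    · simp [collapse_comments, pvPass1, pvPass2, isEmptyB_eq, hemp]
    · by_cases hx : pvIsEmptyExtractedA x = true <;>
        simp [collapse_comments, pvPass1, pvPass2, isEmptyB_eq, hemp, hx]
    · exact absurd rfl (hshort x y r)

-- ===== VERDICT (by name: the statement is the Claim_ definition above) =====
theorem collapse_comments_spec : Claim_equal_collapse_comments := by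
  intro lines _
  unfold Spec_collapse_comments collapse_comments_alt
  simp [fused_eq_two_pass]
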